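-- pv_equiv track=rewrite | github.com/Unrefundable/kodi-mediafusion-bridge | lib/dmm.py | _dmm_hash
-- ===== SOURCE A (Python) =====
-- def _dmm_hash(s):
--     """Port of DMM's custom 32-bit hash function."""
--     h1 = 0xDEADBEEF ^ len(s)
--     h2 = 0x41C6CE57 ^ len(s)
--     for ch in s:
--         c = ord(ch)
--         h1 = _imul(h1 ^ c, 0x9E3779B1) & 0xFFFFFFFF
--         h2 = _imul(h2 ^ c, 0x5F356495) & 0xFFFFFFFF
--         h1 = ((h1 << 5) | (h1 >> 27)) & 0xFFFFFFFF
--         h2 = ((h2 << 5) | (h2 >> 27)) & 0xFFFFFFFF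
--
--     h1 = (h1 + _imul(h2, 0x5D588B65)) & 0xFFFFFFFF
--     h2 = (h2 + _imul(h1, 0x78A76A79)) & 0xFFFFFFFF
--     return format((h1 ^ h2) & 0xFFFFFFFF, "x")
--
-- def _imul(a, b):
--     """Emulate JavaScript Math.imul (signed 32-bit multiply)."""
--     a &= 0xFFFFFFFF
--     b &= 0xFFFFFFFF
--     result = (a * b) & 0xFFFFFFFF
--     if result >= 0x80000000:
--         result -= 0x100000000
--     # we need unsigned for bit shifts later
--     return result & 0xFFFFFFFF
-- ===== SOURCE B (Python) =====
-- def _imul(a, b):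
--     a &= 0xFFFFFFFF
--     b &= 0xFFFFFFFF
--     result = (a * b) & 0xFFFFFFFF
--     if result >= 0x80000000:
--         result -= 0x100000000
--     return result & 0xFFFFFFFF
--
-- def _mix_pass(s, seed, mult):
--     h = seed
--     for ch in s:
--         h = _imul(h ^ ord(ch), mult) & 0xFFFFFFFF
--         h = ((h << 5) | (h >> 27)) & 0xFFFFFFFF
--     return h
--
-- def _dmm_hash(s):
--     n = len(s)
--     h1 = _mix_pass(s, 0xDEADBEEF ^ n, 0x9E3779B1)
--     h2 = _mix_pass(s, 0x41C6CE57 ^ n, 0x5F356495)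
--     h1 = (h1 + _imul(h2, 0x5D588B65)) & 0xFFFFFFFF
--     h2 = (h2 + _imul(h1, 0x78A76A79)) & 0xFFFFFFFF
--     return format((h1 ^ h2) & 0xFFFFFFFF, "x")
-- ===== Notes on version B (the rewrite author's own statement) =====
-- stated objective: alternative
-- what changed: A's single loop carrying the two independent accumulators h1 and h2 is split into two independent single-accumulator passes over the string (loop fission via a seed/multiplier helper), with the identical final mixing.
import Mathlib
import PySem

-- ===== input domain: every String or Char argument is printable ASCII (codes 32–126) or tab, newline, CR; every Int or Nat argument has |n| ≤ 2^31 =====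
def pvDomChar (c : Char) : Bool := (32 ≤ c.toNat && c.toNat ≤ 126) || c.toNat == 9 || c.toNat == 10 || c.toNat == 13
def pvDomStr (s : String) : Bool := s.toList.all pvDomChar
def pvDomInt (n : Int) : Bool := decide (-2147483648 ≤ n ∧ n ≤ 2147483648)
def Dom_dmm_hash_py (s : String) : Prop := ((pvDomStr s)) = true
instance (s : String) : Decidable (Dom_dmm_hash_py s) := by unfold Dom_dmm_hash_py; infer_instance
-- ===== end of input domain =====

-- B replaces A's single loop carrying two independent accumulators by two independent
-- single-accumulator passes over the string (loop fission, factored into a seed/multiplier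
-- helper); identical final mixing. Objective: alternative decomposition, same cost.

-- ===== PORT A =====
-- shared helper: Python _imul (textually identical in Source A and Source B).
-- the 'result -= 0x100000000' branch followed by '& 0xFFFFFFFF' is ported exactly via Int and
-- Python floor-mod (PySem.Int.mod), which is what Python's '&' does on a possibly negative int
def pvImul (a b : Nat) : Nat :=
  let a := a &&& 0xFFFFFFFF
  let b := b &&& 0xFFFFFFFF
  let result := (a * b) &&& 0xFFFFFFFF
  let result : Int := if result ≥ 0x80000000 then (result : Int) - 0x100000000 else (result : Int)
  (PySem.Int.mod result 0x100000000).toNat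

-- format(n, "x") for n ≥ 0: lowercase hex digits, no prefix (exact on Nat)
def pvHex (n : Nat) : String := String.ofList (Nat.toDigits 16 n)

-- the body of A's for-loop, statement for statement (both h1 and h2 updated per char)
def pvStepA (p : Nat × Nat) (ch : Char) : Nat × Nat :=
  let c := ch.toNat
  let h1 := pvImul (p.1 ^^^ c) 0x9E3779B1 &&& 0xFFFFFFFF
  let h2 := pvImul (p.2 ^^^ c) 0x5F356495 &&& 0xFFFFFFFF
  let h1 := ((h1 <<< 5) ||| (h1 >>> 27)) &&& 0xFFFFFFFF
  let h2 := ((h2 <<< 5) ||| (h2 >>> 27)) &&& 0xFFFFFFFF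
  (h1, h2)

def dmm_hash_py (s : String) : String :=
  let h1 := 0xDEADBEEF ^^^ s.toList.length
  let h2 := 0x41C6CE57 ^^^ s.toList.length
  let p := s.toList.foldl pvStepA (h1, h2)
  let h1 := (p.1 + pvImul p.2 0x5D588B65) &&& 0xFFFFFFFF
  let h2 := (p.2 + pvImul h1 0x78A76A79) &&& 0xFFFFFFFF
  pvHex ((h1 ^^^ h2) &&& 0xFFFFFFFF)

-- ===== PORT B =====
-- the body of Source B's _mix_pass loop for one accumulator with multiplier m
def pvStepB (m h : Nat) (ch : Char) : Nat :=
  let h := pvImul (h ^^^ ch.toNat) m &&& 0xFFFFFFFF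
  ((h <<< 5) ||| (h >>> 27)) &&& 0xFFFFFFFF

-- Source B _mix_pass: one independent seeded pass over the string
def pvMixPass (l : List Char) (seed m : Nat) : Nat := l.foldl (pvStepB m) seed

def dmm_hash_py_alt (s : String) : String :=
  let n := s.toList.length
  let h1 := pvMixPass s.toList (0xDEADBEEF ^^^ n) 0x9E3779B1
  let h2 := pvMixPass s.toList (0x41C6CE57 ^^^ n) 0x5F356495
  let h1 := (h1 + pvImul h2 0x5D588B65) &&& 0xFFFFFFFF
  let h2 := (h2 + pvImul h1 0x78A76A79) &&& 0xFFFFFFFF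
  pvHex ((h1 ^^^ h2) &&& 0xFFFFFFFF)

-- ===== PRECONDITION & SPEC =====
def Spec_dmm_hash_py (s : String) (out : String) : Prop := out = dmm_hash_py_alt s
instance (s : String) (out : String) : Decidable (Spec_dmm_hash_py s out) := by unfold Spec_dmm_hash_py; infer_instance

-- ===== CLAIM (what is proved, stated in full; the proofs are below) =====
def Claim_equal_dmm_hash_py : Prop := ∀ (s : String), Dom_dmm_hash_py s → Spec_dmm_hash_py s (dmm_hash_py s)

-- ===== LEMMAS AND PROOFS =====

-- A's per-char step is the pair of B's two per-char steps (zeta/beta reduction only)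
theorem pvStepA_eq (a b : Nat) (ch : Char) :
    pvStepA (a, b) ch = (pvStepB 0x9E3779B1 a ch, pvStepB 0x5F356495 b ch) := rfl

theorem pvMixPass_cons (x : Char) (l : List Char) (s m : Nat) :
    pvMixPass (x :: l) s m = pvMixPass l (pvStepB m s x) m := rfl

-- loop fission: A's fold over the independent pair equals the pair of B's two passes
theorem foldl_pair_fission : ∀ (l : List Char) (a b : Nat),
    l.foldl pvStepA (a, b) = (pvMixPass l a 0x9E3779B1, pvMixPass l b 0x5F356495) := by
  intro l
  induction l with
  | nil => intro a b; rfl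
  | cons x xs ih =>
    intro a b
    rw [List.foldl_cons, pvStepA_eq, pvMixPass_cons, pvMixPass_cons, ih]

-- ===== VERDICT (by name: the statement is the Claim_ definition above) =====
theorem dmm_hash_py_spec : Claim_equal_dmm_hash_py := by
  intro s _
  unfold Spec_dmm_hash_py dmm_hash_py dmm_hash_py_alt
  simp only [foldl_pair_fission]
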